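-- pv_equiv track=rewrite | github.com/akzhan-maker/Homework-proga-1 | Laborotory 1/дз1.py | invert_dict_strict
-- ===== SOURCE A (Python) =====
-- def invert_dict_strict(d):
--     counts = {}
--     for v in d.values():
--         counts[v] = counts.get(v, 0) + 1
--
--     res = {}
--     for k, v in d.items():
--         if counts[v] == 1:
--             res[v] = k
--     return res
-- ===== SOURCE B (Python) =====
-- def invert_dict_strict(d):
--     res = {}
--     dup = set()
--     for k, v in d.items():
--         if v in dup:
--             continue
--         if v in res:
--             del res[v]
--             dup.add(v)
--         else:
--             res[v] = k
--     return res
-- ===== Notes on version B (the rewrite author's own statement) =====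
-- stated objective: alternative
-- what changed: B replaces A's two passes (a counting dict, then a filtering pass over all items) by a single pass that inserts a value on first sighting and deletes it from the result and blacklists it on the second sighting.
import Mathlib
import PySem

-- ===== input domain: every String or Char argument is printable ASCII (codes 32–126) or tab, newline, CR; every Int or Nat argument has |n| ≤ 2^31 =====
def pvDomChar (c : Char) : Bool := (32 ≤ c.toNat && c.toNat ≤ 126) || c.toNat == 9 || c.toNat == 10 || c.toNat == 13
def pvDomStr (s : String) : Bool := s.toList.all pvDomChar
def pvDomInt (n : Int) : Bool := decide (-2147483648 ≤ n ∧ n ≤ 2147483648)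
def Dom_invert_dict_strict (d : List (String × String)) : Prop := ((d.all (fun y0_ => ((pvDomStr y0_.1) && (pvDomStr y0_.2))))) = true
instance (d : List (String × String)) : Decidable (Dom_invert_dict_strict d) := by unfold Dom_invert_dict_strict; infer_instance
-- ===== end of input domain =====

-- B builds the result in ONE pass (insert a value on first sighting, delete it and blacklist the
-- value on the second) instead of A's counting pass followed by a filtering pass; same result.

-- ===== PORT A =====
def invert_dict_strict (d : List (String × String)) : List (String × String) :=
  let counts : PySem.Dict String Int :=
    d.foldl (fun c kv => c.insert kv.2 (c.getD kv.2 0 + 1)) PySem.Dict.empty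
  (d.foldl (fun r kv => if counts.getD kv.2 0 == 1 then r.insert kv.2 kv.1 else r)
    (PySem.Dict.empty : PySem.Dict String String)).items

-- ===== PORT B =====
-- one loop step of Source B: skip blacklisted values, delete+blacklist on second sighting, else insert
def bStep (s : PySem.Dict String String × PySem.Set String) (kv : String × String) :
    PySem.Dict String String × PySem.Set String :=
  if PySem.Set.contains s.2 kv.2 then s
  else if s.1.contains kv.2 then (s.1.erase kv.2, PySem.Set.add s.2 kv.2)
  else (s.1.insert kv.2 kv.1, s.2)

def invert_dict_strict_alt (d : List (String × String)) : List (String × String) :=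
  (d.foldl bStep ((PySem.Dict.empty : PySem.Dict String String), PySem.Set.empty)).1.items


-- ===== PRECONDITION & SPEC =====
def Spec_invert_dict_strict (d : List (String × String)) (out : List (String × String)) : Prop := out = invert_dict_strict_alt d
instance (d : List (String × String)) (out : List (String × String)) : Decidable (Spec_invert_dict_strict d out) := by unfold Spec_invert_dict_strict; infer_instance

-- ===== CLAIM (what is proved, stated in full; the proofs are below) =====
def Claim_equal_invert_dict_strict : Prop := ∀ (d : List (String × String)), Dom_invert_dict_strict d → Spec_invert_dict_strict d (invert_dict_strict d)

-- ===== LEMMAS AND PROOFS =====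

-- the common value of both programs: the uniquely-valued items of d, inverted, in d's order
def pvF (p : List (String × String)) : List (String × String) :=
  (p.filter (fun kv => (p.map Prod.snd).count kv.2 == 1)).map (fun kv => (kv.2, kv.1))

lemma contains_pvF (p : List (String × String)) (v : String) :
    (PySem.Dict.mk (pvF p)).contains v = true ↔ (p.map Prod.snd).count v = 1 := by
  simp only [PySem.Dict.contains, pvF, List.any_map, List.any_eq_true, Function.comp,
    List.mem_filter, beq_iff_eq]
  constructor
  · rintro ⟨kv, ⟨-, h1⟩, rfl⟩
    exact h1
  · intro h
    have hv : v ∈ p.map Prod.snd := by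
      rw [← List.count_pos_iff]; omega
    rcases List.mem_map.mp hv with ⟨kv, hkv, hsnd⟩
    exact ⟨kv, ⟨hkv, by simp [hsnd, h]⟩, hsnd⟩

lemma count_snoc (p : List (String × String)) (k v w : String) :
    ((p ++ [(k, v)]).map Prod.snd).count w
      = (p.map Prod.snd).count w + (if v = w then 1 else 0) := by
  by_cases h : v = w <;> simp [List.count_append, h]

lemma pvF_snoc_zero (p : List (String × String)) (k v : String)
    (h : (p.map Prod.snd).count v = 0) :
    pvF (p ++ [(k, v)]) = pvF p ++ [(v, k)] := by
  have hnm : ∀ kv ∈ p, kv.2 ≠ v := by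
    intro kv hkv he
    have : 0 < (p.map Prod.snd).count v := by
      rw [List.count_pos_iff]; exact he ▸ List.mem_map.mpr ⟨kv, hkv, rfl⟩
    omega
  unfold pvF
  rw [List.filter_append, List.map_append]
  congr 1
  · apply congrArg
    apply List.filter_congr
    intro kv hkv
    rw [count_snoc, if_neg (fun he => hnm kv hkv he.symm), Nat.add_zero]
  · simp [h]

lemma pvF_snoc_pos (p : List (String × String)) (k v : String)
    (h : 1 ≤ (p.map Prod.snd).count v) :
    pvF (p ++ [(k, v)]) = (pvF p).filter (fun y => !(y.1 == v)) := by
  unfold pvF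
  rw [List.filter_append]
  have h2 : List.filter (fun kv => ((p ++ [(k, v)]).map Prod.snd).count kv.2 == 1) [(k, v)] = [] := by
    simp; omega
  rw [h2, List.append_nil, List.filter_map]
  apply congrArg
  have hcomp : ∀ kv ∈ (p.filter (fun kv => (p.map Prod.snd).count kv.2 == 1)),
      ((fun y : String × String => !(y.1 == v)) ∘ fun kv : String × String => (kv.2, kv.1)) kv
        = (fun kv : String × String => !(kv.2 == v)) kv := fun kv _ => rfl
  rw [List.filter_congr hcomp, List.filter_filter]
  apply List.filter_congr
  intro kv hkv
  rw [count_snoc]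
  by_cases he : kv.2 = v
  · subst he; simp; omega
  · simp [he, beq_iff_eq, Ne.symm he]

lemma pvF_filter_eq_self (p : List (String × String)) (v : String)
    (h : (p.map Prod.snd).count v ≠ 1) :
    (pvF p).filter (fun y => !(y.1 == v)) = pvF p := by
  rw [List.filter_eq_self]
  intro y hy
  rcases List.mem_map.mp hy with ⟨kv, hkv, rfl⟩
  rcases List.mem_filter.mp hkv with ⟨-, hq⟩
  simp only [beq_iff_eq] at hq
  simp only [Bool.not_eq_eq_eq_not, Bool.not_true, beq_eq_false_iff_ne, ne_eq]
  intro he; exact h (he ▸ hq)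

lemma pvBgo (l : List (String × String)) :
    ∀ (p : List (String × String)) (dup : PySem.Set String),
    (∀ w, PySem.Set.contains dup w = true ↔ 2 ≤ (p.map Prod.snd).count w) →
    (l.foldl bStep (PySem.Dict.mk (pvF p), dup)).1 = PySem.Dict.mk (pvF (p ++ l)) := by
  induction l with
  | nil => intro p dup _; simp
  | cons kv t ih =>
    intro p dup hdup
    obtain ⟨k, v⟩ := kv
    rw [List.foldl_cons]
    have hassoc : p ++ (k, v) :: t = (p ++ [(k, v)]) ++ t := by simp
    rw [hassoc]
    by_cases hc2 : 2 ≤ (p.map Prod.snd).count v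
    · -- value already blacklisted: state unchanged
      have hd : PySem.Set.contains dup v = true := (hdup v).mpr hc2
      have hdm : v ∈ dup := by simpa [PySem.Set.contains, List.contains_eq_mem] using hd
      have hstep : bStep (PySem.Dict.mk (pvF p), dup) (k, v) = (PySem.Dict.mk (pvF p), dup) := by
        simp [bStep, hdm]
      have hF : pvF p = pvF (p ++ [(k, v)]) := by
        rw [pvF_snoc_pos p k v (by omega), pvF_filter_eq_self p v (by omega)]
      rw [hstep, hF]
      apply ih
      intro w
      rw [hdup w, count_snoc]
      by_cases he : v = w
      · subst he; rw [if_pos rfl]; constructor <;> intro <;> omega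
      · simp [he]
    · have hd : PySem.Set.contains dup v = false := by
        cases hx : PySem.Set.contains dup v
        · rfl
        · exact absurd ((hdup v).mp hx) hc2
      have hdnm : v ∉ dup := by simpa [PySem.Set.contains, List.contains_eq_mem] using hd
      by_cases hc1 : (p.map Prod.snd).count v = 1
      · -- second sighting: delete from res, blacklist v
        have hct : (PySem.Dict.mk (pvF p)).contains v = true := (contains_pvF p v).mpr hc1
        have hstep : bStep (PySem.Dict.mk (pvF p), dup) (k, v)
            = (PySem.Dict.mk ((pvF p).filter (fun y => !(y.1 == v))), PySem.Set.add dup v) := by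
          have hct' : ((pvF p).any fun y => y.1 == v) = true := hct
          simp [bStep, hdnm, hct', PySem.Dict.erase]
        rw [hstep, ← pvF_snoc_pos p k v (by omega)]
        apply ih
        intro w
        have hmem : PySem.Set.contains (PySem.Set.add dup v) w = true ↔ w ∈ dup ∨ w = v := by
          simp only [PySem.Set.contains, List.contains_eq_mem, decide_eq_true_eq]
          exact PySem.Set.mem_add dup v w
        rw [hmem, count_snoc]
        by_cases he : v = w
        · subst he; simp [hc1]
        · simp only [if_neg he, Nat.add_zero]
          constructor
          · rintro (hw | hw)
            · exact (hdup w).mp (by simpa [PySem.Set.contains, List.contains_eq_mem] using hw)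
            · exact absurd hw.symm he
          · intro hw
            exact Or.inl (by simpa [PySem.Set.contains, List.contains_eq_mem] using (hdup w).mpr hw)
      · -- first sighting: insert
        have hc0 : (p.map Prod.snd).count v = 0 := by omega
        have hcf : (PySem.Dict.mk (pvF p)).contains v = false := by
          cases hx : (PySem.Dict.mk (pvF p)).contains v
          · rfl
          · exact absurd ((contains_pvF p v).mp hx) hc1
        have hstep : bStep (PySem.Dict.mk (pvF p), dup) (k, v)
            = (PySem.Dict.mk (pvF p ++ [(v, k)]), dup) := by
          have hcf' : ((pvF p).any fun y => y.1 == v) = false := hcf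
          have hins := PySem.Dict.items_insert_of_not_contains (PySem.Dict.mk (pvF p)) (k := v) k hcf
          simp [bStep, hdnm, hcf']
          exact PySem.Dict.ext hins
        rw [hstep, ← pvF_snoc_zero p k v hc0]
        apply ih
        intro w
        rw [hdup w, count_snoc]
        by_cases he : v = w
        · subst he; rw [hc0]; rw [if_pos rfl]; constructor <;> intro <;> omega
        · simp [he]

lemma alt_eq_pvF (d : List (String × String)) : invert_dict_strict_alt d = pvF d := by
  unfold invert_dict_strict_alt
  have h0 : ∀ w : String, PySem.Set.contains PySem.Set.empty w = true ↔ 2 ≤ (([] : List (String × String)).map Prod.snd).count w := by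
    intro w; simp [PySem.Set.contains, PySem.Set.empty]
  have h := pvBgo d [] PySem.Set.empty h0
  simp only [List.nil_append] at h
  have hempty : (PySem.Dict.empty : PySem.Dict String String) = PySem.Dict.mk (pvF []) := rfl
  rw [hempty, h]

lemma a_counts (d : List (String × String)) (v : String) :
    (d.foldl (fun c kv => c.insert kv.2 (c.getD kv.2 0 + 1)) (PySem.Dict.empty : PySem.Dict String Int)).getD v 0
      = ((d.map Prod.snd).count v : Int) := by
  rw [← List.foldl_map (f := Prod.snd) (g := fun c v => PySem.Dict.insert c v (c.getD v 0 + 1)),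
    PySem.Dict.getD_foldl_insert_add_one]
  simp [PySem.Dict.getD_empty]

lemma a_second_pass (d : List (String × String)) (counts : PySem.Dict String Int)
    (hc : ∀ v, counts.getD v 0 = ((d.map Prod.snd).count v : Int)) :
    (d.foldl (fun r kv => if counts.getD kv.2 0 == 1 then r.insert kv.2 kv.1 else r)
      (PySem.Dict.empty : PySem.Dict String String)).items = pvF d := by
  have hbeq : ∀ n : Nat, ((n : Int) == 1) = (n == 1) := by
    intro n
    rw [Bool.eq_iff_iff, beq_iff_eq, beq_iff_eq]
    exact ⟨fun h => by exact_mod_cast h, fun h => by exact_mod_cast h⟩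
  rw [PySem.List.foldl_congr_mem d _
    (fun (r : PySem.Dict String String) kv =>
      if ((d.map Prod.snd).count kv.2 == 1) then r.insert kv.2 kv.1 else r)
    _ (by
      intro acc kv _
      rw [hc kv.2, hbeq])]
  rw [PySem.List.foldl_if_eq_foldl_filter]
  have hnodup : ((d.filter (fun kv => (d.map Prod.snd).count kv.2 == 1)).map Prod.snd).Nodup := by
    rw [List.nodup_iff_count_le_one]
    intro a
    have hsub : ((d.filter (fun kv => (d.map Prod.snd).count kv.2 == 1)).map Prod.snd).Sublist
        (d.map Prod.snd) := List.Sublist.map Prod.snd List.filter_sublist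
    by_cases hm : a ∈ (d.filter (fun kv => (d.map Prod.snd).count kv.2 == 1)).map Prod.snd
    · rcases List.mem_map.mp hm with ⟨kv, hkv, rfl⟩
      rcases List.mem_filter.mp hkv with ⟨-, hq⟩
      simp only [beq_iff_eq] at hq
      calc _ ≤ (d.map Prod.snd).count kv.2 := hsub.count_le kv.2
        _ ≤ 1 := by omega
    · rw [List.count_eq_zero_of_not_mem hm]; omega
  rw [PySem.Dict.items_foldl_insert_fresh _ Prod.snd Prod.fst PySem.Dict.empty
    (fun a _ => PySem.Dict.contains_empty a.2) hnodup]
  simp [pvF, PySem.Dict.empty]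

lemma a_eq_pvF (d : List (String × String)) : invert_dict_strict d = pvF d := by
  show (d.foldl (fun r kv =>
      if (d.foldl (fun c kv => c.insert kv.2 (c.getD kv.2 0 + 1)) (PySem.Dict.empty : PySem.Dict String Int)).getD kv.2 0 == 1
      then r.insert kv.2 kv.1 else r)
    (PySem.Dict.empty : PySem.Dict String String)).items = pvF d
  exact a_second_pass d _ (a_counts d)

-- ===== VERDICT (by name: the statement is the Claim_ definition above) =====
theorem invert_dict_strict_spec : Claim_equal_invert_dict_strict := by
  intro d _
  unfold Spec_invert_dict_strict
  rw [a_eq_pvF, alt_eq_pvF]
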